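-- pv_equiv track=rewrite | github.com/NickBotelho/UYA_Database_Manager | DBScripts/DBScript6-BackcalculateWinLossStreaks.py | parseBitstring
-- ===== SOURCE A (Python) =====
-- def parseBitstring(bitstring):
--     currWins, currLosses = 0, 0
--     bestWins, bestLosses = 0, 0
--
--     for game in bitstring:
--         if game == '1':
--             currWins+=1
--             bestWins = max(currWins, bestWins)
--             currLosses = 0
--         else:
--             currLosses+=1
--             bestLosses = max(currLosses, bestLosses)
--             currWins = 0
--
--     return bestWins, bestLosses, currWins, currLosses
-- ===== SOURCE B (Python) =====
-- def parseBitstring(bitstring):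
--     # Run-length decomposition: build the list of (isWin, runLength) runs once,
--     # then read bests as maxima over runs and currents from the final run.
--     runs = []
--     curKey, curLen = None, 0
--     for c in bitstring:
--         k = (c == '1')
--         if curLen and k == curKey:
--             curLen += 1
--         else:
--             if curLen:
--                 runs.append((curKey, curLen))
--             curKey, curLen = k, 1
--     if curLen:
--         runs.append((curKey, curLen))
--
--     bestWins, bestLosses = 0, 0
--     for k, n in runs:
--         if k:
--             bestWins = max(bestWins, n)
--         else:
--             bestLosses = max(bestLosses, n)
--
--     if runs and runs[-1][0]:
--         currWins, currLosses = runs[-1][1], 0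
--     elif runs:
--         currWins, currLosses = 0, runs[-1][1]
--     else:
--         currWins, currLosses = 0, 0
--     return bestWins, bestLosses, currWins, currLosses
-- ===== Notes on version B (the rewrite author's own statement) =====
-- stated objective: alternative
-- what changed: B replaces A's per-character four-variable state machine with a run-length-encoding decomposition: it builds the list of (isWin, runLength) runs once, takes best streaks as maxima over the runs and current streaks from the final run.
import Mathlib
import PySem

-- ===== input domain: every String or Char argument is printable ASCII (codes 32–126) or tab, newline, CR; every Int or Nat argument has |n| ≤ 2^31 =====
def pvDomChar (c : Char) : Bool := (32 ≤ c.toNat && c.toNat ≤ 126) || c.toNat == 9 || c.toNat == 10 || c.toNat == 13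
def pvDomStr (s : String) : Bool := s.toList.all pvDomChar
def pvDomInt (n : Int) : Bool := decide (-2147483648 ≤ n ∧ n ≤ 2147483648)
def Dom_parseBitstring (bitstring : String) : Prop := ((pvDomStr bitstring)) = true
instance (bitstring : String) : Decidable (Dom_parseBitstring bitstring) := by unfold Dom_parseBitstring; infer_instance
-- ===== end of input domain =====

-- B computes the same quadruple via run-length encoding instead of A's per-character state machine (alternative decomposition; same value everywhere).

-- ===== PORT A =====
def pbStepA (s : Int × Int × Int × Int) (game : Char) : Int × Int × Int × Int :=
  match s with
  | (currWins, currLosses, bestWins, bestLosses) =>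
    if game == '1' then
      (currWins + 1, 0, max (currWins + 1) bestWins, bestLosses)
    else
      (0, currLosses + 1, bestWins, max (currLosses + 1) bestLosses)

def parseBitstring (bitstring : String) : Int × Int × Int × Int :=
  let r := bitstring.toList.foldl pbStepA (0, 0, 0, 0)
  (r.2.2.1, r.2.2.2, r.1, r.2.1)

-- ===== PORT B =====
-- run-length grouping: carry the open run (k, n), flush it on key change / at the end
def pbGroup (k : Bool) (n : Int) : List Char → List (Bool × Int)
  | [] => [(k, n)]
  | c :: cs => if (c == '1') = k then pbGroup k (n + 1) cs else (k, n) :: pbGroup (c == '1') 1 cs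

def pbRuns : List Char → List (Bool × Int)
  | [] => []
  | c :: cs => pbGroup (c == '1') 1 cs

def pbBUpd (b : Int × Int) (r : Bool × Int) : Int × Int :=
  if r.1 then (max b.1 r.2, b.2) else (b.1, max b.2 r.2)

def pbBests (rs : List (Bool × Int)) : Int × Int := rs.foldl pbBUpd (0, 0)

def pbFinalize (rs : List (Bool × Int)) : Int × Int × Int × Int :=
  let b := pbBests rs
  match rs.getLast? with
  | some (true, n) => (b.1, b.2, n, 0)
  | some (false, n) => (b.1, b.2, 0, n)
  | none => (b.1, b.2, 0, 0)

def parseBitstring_alt (bitstring : String) : Int × Int × Int × Int :=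
  pbFinalize (pbRuns bitstring.toList)

-- ===== PRECONDITION & SPEC =====
def Spec_parseBitstring (bitstring : String) (out : Int × Int × Int × Int) : Prop := out = parseBitstring_alt bitstring
instance (bitstring : String) (out : Int × Int × Int × Int) : Decidable (Spec_parseBitstring bitstring out) := by unfold Spec_parseBitstring; infer_instance

-- ===== CLAIM (what is proved, stated in full; the proofs are below) =====
def Claim_equal_parseBitstring : Prop := ∀ (bitstring : String), Dom_parseBitstring bitstring → Spec_parseBitstring bitstring (parseBitstring bitstring)

-- ===== LEMMAS AND PROOFS =====

-- appending one element to the run list (the effect of one more character)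
def pbSnoc : List (Bool × Int) → Bool → List (Bool × Int)
  | [], k => [(k, 1)]
  | [(k', n)], k => if k' = k then [(k', n + 1)] else [(k', n), (k, 1)]
  | r :: r' :: rs, k => r :: pbSnoc (r' :: rs) k

-- the one-character step of B's final quadruple, keyed by whether the char is '1'
def pbStepFin (q : Bool) (t : Int × Int × Int × Int) : Int × Int × Int × Int :=
  if q then (max (t.2.2.1 + 1) t.1, t.2.1, t.2.2.1 + 1, 0)
  else (t.1, max (t.2.2.2 + 1) t.2.1, 0, t.2.2.2 + 1)

def pbProj (s : Int × Int × Int × Int) : Int × Int × Int × Int := (s.2.2.1, s.2.2.2, s.1, s.2.1)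

theorem pbSnoc_cons (r : Bool × Int) (rs : List (Bool × Int)) (k : Bool) (h : rs ≠ []) :
    pbSnoc (r :: rs) k = r :: pbSnoc rs k := by
  cases rs with
  | nil => exact absurd rfl h
  | cons r' rs' => rfl

theorem pbGroup_snoc (cs : List Char) (k : Bool) (n : Int) (c : Char) :
    pbGroup k n (cs ++ [c]) = pbSnoc (pbGroup k n cs) (c == '1') := by
  induction cs generalizing k n with
  | nil =>
    simp only [List.nil_append, pbGroup, pbSnoc]
    by_cases h : (c == '1') = k
    · simp [h]
    · have h' : ¬ k = (c == '1') := fun hh => h hh.symm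
      simp [h, h']
  | cons x xs ih =>
    have hne : ∀ (k : Bool) (n : Int) (cs : List Char), pbGroup k n cs ≠ [] := by
      intro k n cs
      induction cs generalizing k n with
      | nil => simp [pbGroup]
      | cons y ys ihy =>
        simp only [pbGroup]
        split
        · exact ihy _ _
        · simp
    simp only [List.cons_append, pbGroup]
    by_cases h : (x == '1') = k
    · simp [h, ih]
    · simp [h, ih, pbSnoc_cons _ _ _ (hne _ _ _)]

theorem pbRuns_snoc (l : List Char) (c : Char) :
    pbRuns (l ++ [c]) = pbSnoc (pbRuns l) (c == '1') := by
  cases l with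
  | nil => simp [pbRuns, pbGroup, pbSnoc]
  | cons x xs => simp only [List.cons_append, pbRuns]; exact pbGroup_snoc xs _ 1 c

theorem pbSnoc_eq (rs : List (Bool × Int)) (k : Bool) (h : rs ≠ []) :
    pbSnoc rs k =
      if (rs.getLast h).1 = k then rs.dropLast ++ [((rs.getLast h).1, (rs.getLast h).2 + 1)]
      else rs ++ [(k, 1)] := by
  induction rs with
  | nil => exact absurd rfl h
  | cons r rs ih =>
    cases rs with
    | nil =>
      obtain ⟨k', n⟩ := r
      by_cases hk : k' = k <;> simp [pbSnoc, hk]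
    | cons r' rs' =>
      have h' : r' :: rs' ≠ [] := by simp
      rw [pbSnoc_cons r _ k h', ih h']
      by_cases hk : ((r' :: rs').getLast h').1 = k <;>
        simp [List.getLast_cons h', hk, List.dropLast_cons_of_ne_nil h']

theorem pbFinalize_snoc (rs : List (Bool × Int)) (q : Bool) :
    pbFinalize (pbSnoc rs q) = pbStepFin q (pbFinalize rs) := by
  by_cases h : rs = []
  · subst h; cases q <;> decide
  · obtain ⟨k, n, hL⟩ : ∃ k n, rs.getLast h = (k, n) := ⟨(rs.getLast h).1, (rs.getLast h).2, rfl⟩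
    have hdec : rs.dropLast ++ [rs.getLast h] = rs := List.dropLast_append_getLast h
    have hL? : rs.getLast? = some (k, n) := by
      rw [List.getLast?_eq_some_getLast h]; exact congrArg some hL
    rw [pbSnoc_eq rs q h, hL]
    by_cases hk : k = q
    · -- the new character extends the last run
      subst hk
      conv_rhs => rw [← hdec, hL]
      simp only [pbFinalize, pbBests, List.foldl_append, List.getLast?_concat, List.foldl_cons,
        List.foldl_nil, pbStepFin, pbBUpd]
      cases k <;> simp [pbBUpd] <;> omega
    · -- the new character opens a fresh run
      simp only [hk, if_false, pbFinalize, pbBests, List.foldl_append, List.getLast?_concat, hL?,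
        List.foldl_cons, List.foldl_nil, pbStepFin, pbBUpd]
      cases k <;> cases q <;> simp_all [Prod.ext_iff] <;> omega

theorem pbProj_step (s : Int × Int × Int × Int) (c : Char) :
    pbProj (pbStepA s c) = pbStepFin (c == '1') (pbProj s) := by
  obtain ⟨cw, cl, bw, bl⟩ := s
  by_cases h : (c == '1') = true <;> simp [pbStepA, pbStepFin, pbProj, h]

theorem pb_main (l : List Char) :
    pbProj (l.foldl pbStepA (0, 0, 0, 0)) = pbFinalize (pbRuns l) := by
  induction l using List.reverseRecOn with
  | nil => decide
  | append_singleton l c ih =>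
    rw [List.foldl_append, List.foldl_cons, List.foldl_nil, pbProj_step, ih, pbRuns_snoc,
      pbFinalize_snoc]

-- ===== VERDICT (by name: the statement is the Claim_ definition above) =====
theorem parseBitstring_spec : Claim_equal_parseBitstring := by
  intro bitstring _
  show parseBitstring bitstring = parseBitstring_alt bitstring
  unfold parseBitstring parseBitstring_alt
  exact pb_main bitstring.toList
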